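-- pv_equiv track=rewrite | github.com/jernejjanez/advent-of-code | 2023/day-14/day14.py | move_rocks
-- ===== SOURCE A (Python) =====
-- def move_rocks(line):
--     current_available_position = 0
--     for i in range(len(line)):
--         if line[i] == "O":
--             if i != current_available_position:
--                 line = line[:i] + "." + line[i + 1:]
--                 line = line[:current_available_position] + "O" + line[current_available_position + 1:]
--             current_available_position += 1
--         elif line[i] == "#":
--             current_available_position = i + 1
--     return line
-- ===== SOURCE B (Python) =====
-- def move_rocks(line):
--     # One left-to-right pass: buffer the current wall-free segment, count its
--     # rocks, and emit each finished segment as rocks first, then the remaining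
--     # characters with every moved rock's old spot turned into '.'.
--     parts = []
--     seg = []
--     k = 0
--     for c in line:
--         if c == '#':
--             parts.append('O' * k)
--             parts.extend('.' if d == 'O' else d for d in seg[k:])
--             parts.append('#')
--             seg = []
--             k = 0
--         else:
--             seg.append(c)
--             if c == 'O':
--                 k += 1
--     parts.append('O' * k)
--     parts.extend('.' if d == 'O' else d for d in seg[k:])
--     return ''.join(parts)
-- ===== Notes on version B (the rewrite author's own statement) =====
-- stated objective: alternative
-- what changed: Instead of repeatedly rebuilding the whole string with four slices for every rock moved, B makes one pass that buffers the current wall-free segment with its rock count and emits each segment as packed rocks followed by the remaining characters (moved rocks' old spots become '.').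
import Mathlib
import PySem

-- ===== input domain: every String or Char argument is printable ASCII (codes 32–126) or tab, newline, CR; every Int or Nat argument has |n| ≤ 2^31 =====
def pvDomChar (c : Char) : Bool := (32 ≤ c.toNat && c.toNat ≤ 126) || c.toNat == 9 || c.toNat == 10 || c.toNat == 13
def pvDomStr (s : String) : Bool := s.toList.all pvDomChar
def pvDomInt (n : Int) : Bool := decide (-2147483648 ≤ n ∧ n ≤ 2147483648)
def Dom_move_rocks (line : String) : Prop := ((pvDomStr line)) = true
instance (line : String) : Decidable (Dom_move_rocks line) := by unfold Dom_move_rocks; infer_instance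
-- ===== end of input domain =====

-- B replaces A's per-rock whole-string reslicing with one pass that buffers each
-- wall-free segment and its rock count and emits the segment rolled in one go.

-- ===== PORT A =====
-- A is ported over List Char (the PySem string ops are thin wrappers over their
-- List Char versions); the loop body, exactly A's: state (line, current_available_position).
def pvStepA (st : List Char × Int) (i : Int) : List Char × Int :=
  match PySem.List.pyGet? st.1 i with
  | some c =>
    if c = 'O' then
      let l := if i ≠ st.2 then
          -- line = line[:i] + "." + line[i+1:]; line = line[:cap] + "O" + line[cap+1:]
          let l1 := PySem.List.slice st.1 none (some i) ++ ['.'] ++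
                    PySem.List.slice st.1 (some (i + 1)) none
          PySem.List.slice l1 none (some st.2) ++ ['O'] ++
            PySem.List.slice l1 (some (st.2 + 1)) none
        else st.1
      (l, st.2 + 1)
    else if c = '#' then (st.1, i + 1)
    else st
  | none => st   -- unreachable: i is always in range

def move_rocks (line : String) : String :=
  String.ofList ((PySem.List.pyRange 0 (line.toList.length : Int) 1).foldl
    pvStepA (line.toList, 0)).1

-- ===== PORT B =====
-- flush of one wall-free segment: its k rocks first, then the chars past position k
-- with rocks' old spots as '.'  ('O' * k + ('.' if d == 'O' else d for d in seg[k:]))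
def pvFlush (seg : List Char) (k : Nat) : List Char :=
  List.replicate k 'O' ++ (seg.drop k).map (fun d => if d == 'O' then '.' else d)

-- B's loop body: state (parts-so-far, current segment buffer, its rock count)
def pvStepB (st : List Char × List Char × Nat) (c : Char) : List Char × List Char × Nat :=
  if c == '#' then (st.1 ++ pvFlush st.2.1 st.2.2 ++ ['#'], [], 0)
  else (st.1, st.2.1 ++ [c], if c == 'O' then st.2.2 + 1 else st.2.2)

def move_rocks_alt (line : String) : String :=
  let st := line.toList.foldl pvStepB ([], [], 0)
  String.ofList (st.1 ++ pvFlush st.2.1 st.2.2)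

-- ===== PRECONDITION & SPEC =====
def Spec_move_rocks (line : String) (out : String) : Prop := out = move_rocks_alt line
instance (line : String) (out : String) : Decidable (Spec_move_rocks line out) := by
  unfold Spec_move_rocks; infer_instance

-- ===== CLAIM (what is proved, stated in full; the proofs are below) =====
def Claim_equal_move_rocks : Prop := ∀ (line : String), Dom_move_rocks line → Spec_move_rocks line (move_rocks line)

-- ===== LEMMAS AND PROOFS =====

-- rolled form of one wall-free segment
def rollSeg (seg : List Char) : List Char := pvFlush seg (seg.countP (· == 'O'))

-- rolled form of a whole line: segments between walls, each rolled
def roll (xs : List Char) : List Char :=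
  if (xs.dropWhile (· != '#')) = [] then rollSeg (xs.takeWhile (· != '#'))
  else rollSeg (xs.takeWhile (· != '#')) ++ '#' :: roll ((xs.dropWhile (· != '#')).tail)
termination_by xs.length
decreasing_by
  have h1 := xs.length_dropWhile_le (p := (· != '#'))
  rename_i h
  cases hdw : xs.dropWhile (· != '#') with
  | nil => exact absurd hdw h
  | cons y ys =>
    rw [hdw] at h1
    simp only [List.length_cons, List.tail_cons] at h1 ⊢
    omega

theorem tw_app (u v : List Char) (h : ∀ c ∈ u, c ≠ '#') :
    (u ++ v).takeWhile (· != '#') = u ++ v.takeWhile (· != '#') := by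
  induction u with
  | nil => simp
  | cons a u ih =>
    have ha : (a != '#') = true := by simpa using h a (by simp)
    simp only [List.cons_append, List.takeWhile_cons, ha, if_true]
    rw [ih (fun c hc => h c (by simp [hc]))]

theorem dw_app (u v : List Char) (h : ∀ c ∈ u, c ≠ '#') :
    (u ++ v).dropWhile (· != '#') = v.dropWhile (· != '#') := by
  induction u with
  | nil => simp
  | cons a u ih =>
    have ha : (a != '#') = true := by simpa using h a (by simp)
    simp only [List.cons_append, List.dropWhile_cons, ha, if_true]
    exact ih (fun c hc => h c (by simp [hc]))

theorem countP_clean (seg : List Char) (h : ∀ c ∈ seg, c ≠ 'O') :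
    seg.countP (· == 'O') = 0 :=
  List.countP_eq_zero.mpr (by intro c hc; simpa using h c hc)

theorem map_clean (seg : List Char) (h : ∀ c ∈ seg, c ≠ 'O') :
    seg.map (fun d => if d == 'O' then '.' else d) = seg := by
  conv_rhs => rw [← List.map_id seg]
  exact List.map_congr_left (by intro a ha; simp [h a ha])

theorem rollSeg_of_clean (seg : List Char) (h : ∀ c ∈ seg, c ≠ 'O') : rollSeg seg = seg := by
  unfold rollSeg pvFlush
  rw [countP_clean seg h, List.drop_zero, List.replicate_zero, List.nil_append, map_clean seg h]

theorem rollSeg_O_cons (t : List Char) : rollSeg ('O' :: t) = 'O' :: rollSeg t := by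
  simp [rollSeg, pvFlush, List.replicate_succ]

theorem segPull (c₀ : Char) (mid t : List Char) (hc : c₀ ≠ 'O') (hm : ∀ c ∈ mid, c ≠ 'O') :
    rollSeg (c₀ :: (mid ++ 'O' :: t)) = 'O' :: rollSeg (mid ++ '.' :: t) := by
  have hcc : (c₀ == 'O') = false := by simpa using hc
  simp [rollSeg, pvFlush, List.countP_append, countP_clean mid hm, hcc,
        List.replicate_succ, List.map_drop, List.map_append]

theorem roll_nohash (xs : List Char) (h : ∀ c ∈ xs, c ≠ '#') : roll xs = rollSeg xs := by
  have hd : xs.dropWhile (· != '#') = [] := by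
    rw [List.dropWhile_eq_nil_iff]; intro c hc; simpa using h c hc
  have ht : xs.takeWhile (· != '#') = xs := by
    rw [List.takeWhile_eq_self_iff]; intro c hc; simpa using h c hc
  rw [roll.eq_def, hd, ht]
  simp

theorem roll_of_clean (xs : List Char) (h : ∀ c ∈ xs, c ≠ 'O' ∧ c ≠ '#') : roll xs = xs := by
  rw [roll_nohash xs (fun c hc => (h c hc).2)]
  exact rollSeg_of_clean xs (fun c hc => (h c hc).1)

theorem roll_hash (a rest : List Char) (h : ∀ c ∈ a, c ≠ '#') :
    roll (a ++ '#' :: rest) = rollSeg a ++ '#' :: roll rest := by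
  have hd : (a ++ '#' :: rest).dropWhile (· != '#') = '#' :: rest := by
    rw [dw_app a _ h]; simp
  have ht : (a ++ '#' :: rest).takeWhile (· != '#') = a := by
    rw [tw_app a _ h]; simp
  rw [roll.eq_def, hd, ht]
  simp

theorem roll_O_head (rest : List Char) : roll ('O' :: rest) = 'O' :: roll rest := by
  have hd : ('O' :: rest).dropWhile (· != '#') = rest.dropWhile (· != '#') := by
    simp
  have ht : ('O' :: rest).takeWhile (· != '#') = 'O' :: rest.takeWhile (· != '#') := by
    simp
  rw [roll.eq_def, roll.eq_def (xs := rest), hd, ht]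
  by_cases hdw : rest.dropWhile (· != '#') = []
  · simp [hdw, rollSeg_O_cons]
  · simp [hdw, rollSeg_O_cons]

theorem roll_O_pull (c₀ : Char) (mid rest : List Char)
    (hc : c₀ ≠ 'O' ∧ c₀ ≠ '#') (hm : ∀ c ∈ mid, c ≠ 'O' ∧ c ≠ '#') :
    roll (c₀ :: (mid ++ 'O' :: rest)) = 'O' :: roll (mid ++ '.' :: rest) := by
  have hclean : ∀ c ∈ c₀ :: mid, c ≠ '#' := by
    intro c hcm
    rcases List.mem_cons.mp hcm with h | h
    · exact h ▸ hc.2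
    · exact (hm c h).2
  have hcleanR : ∀ c ∈ mid, c ≠ '#' := fun c h => (hm c h).2
  have hcleanL : ∀ c ∈ c₀ :: mid ++ ['O'], c ≠ '#' := by
    intro c hcm
    rcases List.mem_cons.mp hcm with h | h
    · exact h ▸ hc.2
    · rcases List.mem_append.mp h with h' | h'
      · exact (hm c h').2
      · rw [List.mem_singleton] at h'; exact h' ▸ (by decide)
  have hcleanD : ∀ c ∈ mid ++ ['.'], c ≠ '#' := by
    intro c hcm
    rcases List.mem_append.mp hcm with h | h
    · exact (hm c h).2
    · rw [List.mem_singleton] at h; exact h ▸ (by decide)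
  have hd : (c₀ :: (mid ++ 'O' :: rest)).dropWhile (· != '#') = rest.dropWhile (· != '#') := by
    rw [show c₀ :: (mid ++ 'O' :: rest) = (c₀ :: mid ++ ['O']) ++ rest from by simp,
        dw_app _ _ hcleanL]
  have hdR : (mid ++ '.' :: rest).dropWhile (· != '#') = rest.dropWhile (· != '#') := by
    rw [show mid ++ '.' :: rest = (mid ++ ['.']) ++ rest from by simp, dw_app _ _ hcleanD]
  have ht : (c₀ :: (mid ++ 'O' :: rest)).takeWhile (· != '#') =
      c₀ :: (mid ++ 'O' :: rest.takeWhile (· != '#')) := by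
    rw [show c₀ :: (mid ++ 'O' :: rest) = (c₀ :: mid ++ ['O']) ++ rest from by simp,
        tw_app _ _ hcleanL]
    simp
  have htR : (mid ++ '.' :: rest).takeWhile (· != '#') =
      mid ++ '.' :: rest.takeWhile (· != '#') := by
    rw [show mid ++ '.' :: rest = (mid ++ ['.']) ++ rest from by simp, tw_app _ _ hcleanD]
    simp
  have hseg := segPull c₀ mid (rest.takeWhile (· != '#')) hc.1 (fun c h => (hm c h).1)
  rw [roll.eq_def, roll.eq_def (xs := mid ++ '.' :: rest), hd, hdR, ht, htR]
  by_cases hdw : rest.dropWhile (· != '#') = []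
  · simp [hdw, hseg]
  · simp [hdw, hseg]

-- A's loop, processed from index |pre| + |mid| with available position |pre| on the
-- line pre ++ mid ++ suffix, yields pre ++ roll (mid ++ suffix) when mid is
-- already-swept (no 'O', no '#').
theorem loopInv (suffix : List Char) : ∀ (pre mid : List Char),
    (∀ c ∈ mid, c ≠ 'O' ∧ c ≠ '#') →
    ((PySem.List.pyRange ((pre.length + mid.length : Nat) : Int)
        (((pre ++ mid ++ suffix).length : Nat) : Int) 1).foldl pvStepA
      (pre ++ mid ++ suffix, (pre.length : Int))).1 = pre ++ roll (mid ++ suffix) := by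
  induction suffix with
  | nil =>
    intro pre mid hm
    rw [PySem.List.pyRange_one_eq_nil (by simp [List.length_append])]
    simp [roll_of_clean mid hm]
  | cons c cs ih =>
    intro pre mid hm
    have hlt : ((pre.length + mid.length : Nat) : Int) <
        (((pre ++ mid ++ (c :: cs)).length : Nat) : Int) := by
      have : (pre ++ mid ++ (c :: cs)).length = pre.length + (mid.length + (cs.length + 1)) := by
        simp [List.length_append]
      rw [this]; exact_mod_cast (by omega : pre.length + mid.length < pre.length + (mid.length + (cs.length + 1)))
    rw [PySem.List.pyRange_one_cons hlt, List.foldl_cons]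
    have hget : PySem.List.pyGet? (pre ++ mid ++ c :: cs) ((pre.length + mid.length : Nat) : Int)
        = some c := by
      rw [PySem.List.pyGet?_natCast]
      rw [show pre.length + mid.length = (pre ++ mid).length from by simp]
      rw [List.getElem?_append_right (le_refl _)]
      simp
    by_cases hO : c = 'O'
    · subst hO
      cases mid with
      | nil =>
        simp only [List.length_nil, Nat.add_zero, List.nil_append, List.append_nil] at *
        have hif : ¬ (((pre.length : Nat) : Int) ≠ ((pre.length : Nat) : Int)) := by simp
        simp only [pvStepA, hget, if_neg hif]
        rw [roll_O_head]
        have H := ih (pre ++ ['O']) [] (by simp)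
        simp only [List.length_nil, Nat.add_zero, List.nil_append, List.append_nil,
          List.length_append, List.length_cons, List.append_assoc, List.cons_append] at H ⊢
        push_cast at H ⊢
        ring_nf at H ⊢
        exact H
      | cons m₀ ms =>
        have hm0 := hm m₀ (by simp)
        have hms : ∀ c ∈ ms, c ≠ 'O' ∧ c ≠ '#' := fun c h => hm c (by simp [h])
        have hif : ((pre.length + (m₀ :: ms).length : Nat) : Int) ≠ ((pre.length : Nat) : Int) := by
          simp only [List.length_cons]
          exact_mod_cast (by omega : pre.length + (ms.length + 1) ≠ pre.length)
        simp only [pvStepA, hget, if_pos hif]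
        -- evaluate the two slice-rebuilds
        have e1 : PySem.List.slice (pre ++ (m₀ :: ms) ++ 'O' :: cs) none
            (some ((pre.length + (m₀ :: ms).length : Nat) : Int)) = pre ++ (m₀ :: ms) := by
          rw [PySem.List.slice_to_natCast]
          exact List.take_left' (by simp)
        have e2c : ((pre.length + (m₀ :: ms).length : Nat) : Int) + 1
            = ((pre.length + (m₀ :: ms).length + 1 : Nat) : Int) := by push_cast; omega
        have e2 : PySem.List.slice (pre ++ (m₀ :: ms) ++ 'O' :: cs)
            (some (((pre.length + (m₀ :: ms).length : Nat) : Int) + 1)) none = cs := by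
          rw [e2c, PySem.List.slice_from_natCast]
          rw [show pre ++ (m₀ :: ms) ++ 'O' :: cs = (pre ++ (m₀ :: ms) ++ ['O']) ++ cs from by simp]
          exact List.drop_left' (by
            simp only [List.length_append, List.length_cons, List.length_nil])
        rw [e1, e2]
        have l1eq : pre ++ (m₀ :: ms) ++ ['.'] ++ cs = (pre ++ [m₀]) ++ (ms ++ '.' :: cs) := by
          simp only [List.append_assoc, List.cons_append, List.nil_append]
        have e3 : PySem.List.slice (pre ++ (m₀ :: ms) ++ ['.'] ++ cs) none
            (some ((pre.length : Nat) : Int)) = pre := by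
          rw [PySem.List.slice_to_natCast, l1eq, List.append_assoc]
          exact List.take_left' rfl
        have e4c : ((pre.length : Nat) : Int) + 1 = ((pre.length + 1 : Nat) : Int) := by push_cast; omega
        have e4 : PySem.List.slice (pre ++ (m₀ :: ms) ++ ['.'] ++ cs)
            (some (((pre.length : Nat) : Int) + 1)) none = ms ++ '.' :: cs := by
          rw [e4c, PySem.List.slice_from_natCast, l1eq]
          exact List.drop_left' (by simp)
        rw [e3, e4]
        rw [show (m₀ :: ms) ++ 'O' :: cs = m₀ :: (ms ++ 'O' :: cs) from by simp,
            roll_O_pull m₀ ms cs hm0 hms]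
        have H := ih (pre ++ ['O']) (ms ++ ['.']) (by
          intro d hd
          rcases List.mem_append.mp hd with h | h
          · exact hms d h
          · rw [List.mem_singleton] at h; exact h ▸ (by decide))
        simp only [List.length_append, List.length_cons, List.length_nil, List.append_assoc,
          List.cons_append, List.nil_append] at H ⊢
        push_cast at H ⊢
        ring_nf at H ⊢
        exact H
    · by_cases hH : c = '#'
      · subst hH
        simp only [pvStepA, hget, if_neg (by decide : ¬ ('#' : Char) = 'O')]
        rw [roll_hash mid cs (fun d hd => (hm d hd).2), rollSeg_of_clean mid (fun d hd => (hm d hd).1)]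
        have H := ih (pre ++ mid ++ ['#']) [] (by simp)
        simp only [List.length_nil, Nat.add_zero, List.append_nil, List.nil_append,
          List.length_append, List.length_cons, List.append_assoc, List.cons_append] at H ⊢
        push_cast at H ⊢
        ring_nf at H ⊢
        exact H
      · simp only [pvStepA, hget, if_neg hO, if_neg hH]
        have H := ih pre (mid ++ [c]) (by
          intro d hd
          rcases List.mem_append.mp hd with h | h
          · exact hm d h
          · simp at h; exact h ▸ ⟨hO, hH⟩)
        rw [show mid ++ c :: cs = (mid ++ [c]) ++ cs from by simp]
        simp only [List.length_append, List.length_cons, List.length_nil, List.append_assoc,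
          List.cons_append, List.nil_append] at H ⊢
        push_cast at H ⊢
        ring_nf at H ⊢
        exact H

theorem altGo (xs : List Char) : ∀ (res seg : List Char), (∀ c ∈ seg, c ≠ '#') →
    ((xs.foldl pvStepB (res, seg, seg.countP (· == 'O'))).1 ++
      pvFlush (xs.foldl pvStepB (res, seg, seg.countP (· == 'O'))).2.1
        (xs.foldl pvStepB (res, seg, seg.countP (· == 'O'))).2.2)
    = res ++ roll (seg ++ xs) := by
  induction xs with
  | nil =>
    intro res seg hs
    simp only [List.foldl_nil, List.append_nil]
    rw [roll_nohash seg hs]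
    rfl
  | cons c cs ih =>
    intro res seg hs
    by_cases hc : c = '#'
    · subst hc
      have hstep : pvStepB (res, seg, seg.countP (· == 'O')) '#'
          = (res ++ pvFlush seg (seg.countP (· == 'O')) ++ ['#'], [], 0) := by
        simp [pvStepB]
      rw [List.foldl_cons, hstep]
      have H := ih (res ++ pvFlush seg (seg.countP (· == 'O')) ++ ['#']) [] (by simp)
      simp only [List.countP_nil, List.nil_append] at H
      rw [H, roll_hash seg cs hs]
      simp [rollSeg]
    · have hcb : (c == '#') = false := by simpa using hc
      have hstep : pvStepB (res, seg, seg.countP (· == 'O')) c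
          = (res, seg ++ [c], (seg ++ [c]).countP (· == 'O')) := by
        simp only [pvStepB, hcb, Bool.false_eq_true, if_false]
        by_cases hcO : c = 'O'
        · subst hcO; simp [List.countP_append]
        · have : (c == 'O') = false := by simpa using hcO
          simp [List.countP_append, this]
      rw [List.foldl_cons, hstep]
      have H := ih res (seg ++ [c]) (by
        intro d hd
        rcases List.mem_append.mp hd with h | h
        · exact hs d h
        · simp at h; exact h ▸ hc)
      rw [H]
      simp

theorem alt_eq_roll (line : String) : move_rocks_alt line = String.ofList (roll line.toList) := by
  unfold move_rocks_alt
  have H := altGo line.toList [] [] (by simp)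
  simp only [List.countP_nil, List.nil_append] at H
  exact congrArg String.ofList H

-- ===== VERDICT (by name: the statement is the Claim_ definition above) =====
theorem move_rocks_spec : Claim_equal_move_rocks := by
  intro line _
  unfold Spec_move_rocks
  rw [alt_eq_roll]
  unfold move_rocks
  have h := loopInv line.toList [] [] (by simp)
  simp only [List.nil_append, List.length_nil, Nat.add_zero, Nat.cast_zero] at h
  rw [h]
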